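-- pv_equiv track=rewrite | github.com/ehtec/pie-chart-ocr | piechartocr/helperfunctions.py | cluster_abs_1d
-- ===== SOURCE A (Python) =====
-- def cluster_abs_1d(input_values, atol):
--
--     if not bool(input_values):
--         return []
--
--     sorted_input_values = list(sorted(input_values))
--
--     res_clusters = [[sorted_input_values[0]]]
--
--     for i in range(1, len(sorted_input_values)):
--
--         if sorted_input_values[i] - res_clusters[-1][-1] <= atol:
--             res_clusters[-1].append(sorted_input_values[i])
--
--         else:
--             res_clusters.append([sorted_input_values[i]])
--
--     res_clusters = list(sorted(res_clusters, key=lambda x: len(x), reverse=True))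
--
--     return res_clusters
-- ===== SOURCE B (Python) =====
-- def cluster_abs_1d(input_values, atol):
--     # boundaries-then-slice: find the gap indices in the sorted list, slice at them,
--     # then stable-sort the slices by length, descending
--     if not input_values:
--         return []
--     s = sorted(input_values)
--     n = len(s)
--     bounds = [0] + [i for i in range(1, n) if s[i] - s[i - 1] > atol] + [n]
--     clusters = [s[a:b] for a, b in zip(bounds, bounds[1:])]
--     return sorted(clusters, key=len, reverse=True)
-- ===== Notes on version B (the rewrite author's own statement) =====
-- stated objective: alternative
-- what changed: Replaces the stateful loop that grows or appends to the last cluster with a two-pass boundaries-then-slice construction: collect the indices where consecutive sorted values differ by more than atol, then slice the sorted list at those boundaries; the final stable sort by length (descending) is unchanged.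
import Mathlib
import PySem

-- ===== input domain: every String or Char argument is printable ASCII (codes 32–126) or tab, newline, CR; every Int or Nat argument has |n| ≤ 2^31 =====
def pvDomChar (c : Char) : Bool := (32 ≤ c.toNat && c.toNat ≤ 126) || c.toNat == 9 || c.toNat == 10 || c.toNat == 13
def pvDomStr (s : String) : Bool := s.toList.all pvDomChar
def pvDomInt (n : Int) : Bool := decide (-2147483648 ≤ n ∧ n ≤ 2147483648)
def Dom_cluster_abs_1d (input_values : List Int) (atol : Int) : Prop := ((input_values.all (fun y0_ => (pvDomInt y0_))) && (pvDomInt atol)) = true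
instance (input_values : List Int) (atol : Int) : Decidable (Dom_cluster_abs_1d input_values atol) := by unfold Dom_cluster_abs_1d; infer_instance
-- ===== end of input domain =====

-- B replaces A's stateful grow-or-append loop by a boundaries-then-slice construction
-- (collect the gap indices, slice the sorted list at them); objective: alternative decomposition.

-- ===== PORT A =====
-- one loop step of A; in A, res_clusters and its last cluster are never empty, so the
-- 'none' fallbacks below are never reached (Python would raise IndexError there).
def pvStepA (atol : Int) (acc : List (List Int)) (x : Int) : List (List Int) :=
  match acc.getLast? with
  | none => acc ++ [[x]]
  | some lastc =>
    match lastc.getLast? with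
    | none => acc ++ [[x]]
    | some lastv =>
      if x - lastv ≤ atol then acc.dropLast ++ [lastc ++ [x]]
      else acc ++ [[x]]

def cluster_abs_1d (input_values : List Int) (atol : Int) : List (List Int) :=
  if input_values.isEmpty then []
  else
    let s := PySem.List.sorted input_values (fun x => x)
    -- s[0] and s[i] are always in range here, so pyGetD's default is never used (exact)
    let res := (PySem.List.pyRange 1 (PySem.List.len s)).foldl
        (fun acc i => pvStepA atol acc (PySem.List.pyGetD s i 0)) [[PySem.List.pyGetD s 0 0]]
    PySem.List.sorted res (fun c => c.length) true

-- ===== PORT B =====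
-- [s[a:b] for a, b in zip(bounds, bounds[1:])]
def pvSlices (s : List Int) (bounds : List Int) : List (List Int) :=
  (bounds.zip bounds.tail).map (fun ab => PySem.List.slice s (some ab.1) (some ab.2))

def cluster_abs_1d_alt (input_values : List Int) (atol : Int) : List (List Int) :=
  if input_values.isEmpty then []
  else
    let s := PySem.List.sorted input_values (fun x => x)
    let n := PySem.List.len s
    -- indices from range(1, n) are always in range, so pyGetD's default is never used (exact)
    let bounds : List Int := 0 :: ((PySem.List.pyRange 1 n).filter
        (fun i => decide (atol < PySem.List.pyGetD s i 0 - PySem.List.pyGetD s (i - 1) 0)) ++ [n])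
    PySem.List.sorted (pvSlices s bounds) (fun c => c.length) true

-- ===== PRECONDITION & SPEC =====
def Spec_cluster_abs_1d (input_values : List Int) (atol : Int) (out : List (List Int)) : Prop := out = cluster_abs_1d_alt input_values atol
instance (input_values : List Int) (atol : Int) (out : List (List Int)) : Decidable (Spec_cluster_abs_1d input_values atol out) := by unfold Spec_cluster_abs_1d; infer_instance

-- ===== CLAIM (what is proved, stated in full; the proofs are below) =====
def Claim_equal_cluster_abs_1d : Prop := ∀ (input_values : List Int) (atol : Int), Dom_cluster_abs_1d input_values atol → Spec_cluster_abs_1d input_values atol (cluster_abs_1d input_values atol)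

-- ===== LEMMAS AND PROOFS =====

def pvGrp (atol h : Int) : List Int → List (List Int)
  | [] => [[h]]
  | x :: r =>
    if x - h ≤ atol then
      match pvGrp atol x r with
      | [] => [[h]]
      | c :: cs => (h :: c) :: cs
    else [h] :: pvGrp atol x r

lemma pvGrp_ne_nil (atol h : Int) (t : List Int) : pvGrp atol h t ≠ [] := by
  cases t with
  | nil => simp [pvGrp]
  | cons x r =>
    simp only [pvGrp]
    split
    · cases pvGrp atol x r <;> simp
    · simp

lemma pvFoldA (atol : Int) (t : List Int) : ∀ (acc : List (List Int)) (c : List Int) (h : Int),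
    c.getLast? = some h →
    t.foldl (pvStepA atol) (acc ++ [c]) =
      acc ++ (match pvGrp atol h t with
              | [] => []
              | c1 :: cs => (c.dropLast ++ c1) :: cs) := by
  induction t with
  | nil =>
    intro acc c h hc
    simp only [List.foldl_nil, pvGrp]
    rw [List.dropLast_append_getLast? h hc]
  | cons x r ih =>
    intro acc c h hc
    simp only [List.foldl_cons, pvGrp]
    have hstep : pvStepA atol (acc ++ [c]) x =
        if x - h ≤ atol then acc ++ [c ++ [x]] else (acc ++ [c]) ++ [[x]] := by
      simp only [pvStepA, List.getLast?_concat, hc, List.dropLast_concat]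
    rw [hstep]
    by_cases hle : x - h ≤ atol
    · rw [if_pos hle, if_pos hle]
      rw [ih acc (c ++ [x]) x List.getLast?_concat]
      rcases hgr : pvGrp atol x r with _ | ⟨c1, cs⟩
      · exact absurd hgr (pvGrp_ne_nil atol x r)
      · simp only [List.dropLast_concat]
        congr 2
        rw [← List.dropLast_append_getLast? h hc]
        simp
    · rw [if_neg hle, if_neg hle]
      rw [ih (acc ++ [c]) [x] x rfl]
      rcases hgr : pvGrp atol x r with _ | ⟨c1, cs⟩
      · exact absurd hgr (pvGrp_ne_nil atol x r)
      · simp [List.dropLast_append_getLast? h hc]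

lemma pvR1 (k : Nat) : PySem.List.pyRange 1 ((k:Int)+1) = List.map (fun j : Nat => (j : Int) + 1) (List.range k) := by
  simp only [PySem.List.pyRange]
  norm_num
  rcases Nat.eq_zero_or_pos k with hk | hk
  · subst hk; simp
  · simp [hk]
    intro a _
    ring

lemma pvGetD_cons (a : Int) (l : List Int) (i : Int) (d : Int) (hi : 0 ≤ i) :
    PySem.List.pyGetD (a :: l) (i + 1) d = PySem.List.pyGetD l i d := by
  rw [PySem.List.pyGetD_of_nonneg _ _ (by omega), PySem.List.pyGetD_of_nonneg _ _ hi]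
  have h1 : (i + 1).toNat = i.toNat + 1 := by omega
  rw [h1]
  rfl

lemma pvSliceShift (h : Int) (t : List Int) (a b : Int) (ha : 0 ≤ a) (hb : 0 ≤ b) :
    PySem.List.slice (h :: t) (some (a + 1)) (some (b + 1)) = PySem.List.slice t (some a) (some b) := by
  rw [PySem.List.slice_toNat _ (by omega) (by omega), PySem.List.slice_toNat _ ha hb]
  have h1 : (a + 1).toNat = a.toNat + 1 := by omega
  have h2 : (b + 1).toNat = b.toNat + 1 := by omega
  rw [h1, h2, Nat.succ_sub_succ, List.drop_succ_cons]

lemma pvSliceZero (h : Int) (t : List Int) (c : Int) (hc : 0 ≤ c) :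
    PySem.List.slice (h :: t) (some 0) (some (c + 1)) = h :: PySem.List.slice t (some 0) (some c) := by
  rw [PySem.List.slice_toNat _ (by omega) (by omega), PySem.List.slice_toNat _ (by omega) hc]
  have h1 : (c + 1).toNat = c.toNat + 1 := by omega
  rw [h1]
  simp

lemma pvSlices_cons_cons (s : List Int) (a b : Int) (l : List Int) :
    pvSlices s (a :: b :: l) = PySem.List.slice s (some a) (some b) :: pvSlices s (b :: l) := rfl

lemma pvSlices_shift (h : Int) (t : List Int) (l : List Int) (hl : ∀ y ∈ l, 0 ≤ y) :
    pvSlices (h :: t) (l.map (· + 1)) = pvSlices t l := by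
  unfold pvSlices
  rw [← List.map_tail, List.zip_map, List.map_map]
  refine List.map_congr_left ?_
  intro ab hab
  obtain ⟨h1, h2⟩ := List.of_mem_zip hab
  exact pvSliceShift h t ab.1 ab.2 (hl _ h1) (hl _ (List.mem_of_mem_tail h2))

lemma pvGetD_cons' (a : Int) (l : List Int) (i : Int) (d : Int) (hi : 1 ≤ i) :
    PySem.List.pyGetD (a :: l) i d = PySem.List.pyGetD l (i - 1) d := by
  have h2 := pvGetD_cons a l (i - 1) d (by omega)
  rw [sub_add_cancel] at h2
  exact h2

lemma pvSlicesB (atol : Int) (t : List Int) : ∀ h : Int,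
    pvSlices (h :: t) (0 :: ((PySem.List.pyRange 1 (PySem.List.len (h :: t))).filter
        (fun i => decide (atol < PySem.List.pyGetD (h :: t) i 0 - PySem.List.pyGetD (h :: t) (i - 1) 0))
      ++ [PySem.List.len (h :: t)]))
    = pvGrp atol h t := by
  induction t with
  | nil =>
    intro h
    have h1 : PySem.List.len [h] = ((0:Nat):Int) + 1 := by simp [PySem.List.len]
    rw [h1, pvR1 0]
    simp only [List.range_zero, List.map_nil, List.filter_nil, List.nil_append]
    norm_num
    rw [pvSlices_cons_cons]
    rw [PySem.List.slice_toNat _ (by omega) (by omega)]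
    simp [pvSlices, pvGrp]
  | cons x r ih =>
    intro h
    have hlen2 : PySem.List.len (h :: x :: r) = PySem.List.len (x :: r) + 1 := by
      simp [PySem.List.len]
    have hlen1 : PySem.List.len (x :: r) = ((r.length : Nat) : Int) + 1 := by
      simp [PySem.List.len]
    -- split range(1, len s) into [1] and the shifted range(1, len t)
    have hrange : PySem.List.pyRange 1 (PySem.List.len (h :: x :: r))
        = 1 :: (PySem.List.pyRange 1 (PySem.List.len (x :: r))).map (· + 1) := by
      rw [hlen2, hlen1]
      have : ((r.length : Nat) : Int) + 1 + 1 = ((r.length + 1 : Nat) : Int) + 1 := by push_cast; ring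
      rw [this, pvR1, pvR1, List.range_succ_eq_map, List.map_cons, List.map_map, List.map_map]
      norm_num
    -- the head condition reads the gap x - h
    have hP1 : (decide (atol < PySem.List.pyGetD (h :: x :: r) 1 0 - PySem.List.pyGetD (h :: x :: r) (1 - 1) 0))
        = decide (atol < x - h) := by
      have ha : PySem.List.pyGetD (h :: x :: r) 1 0 = x := by
        rw [PySem.List.pyGetD_of_nonneg _ _ (by norm_num : (0:Int) ≤ 1)]; rfl
      have hb : PySem.List.pyGetD (h :: x :: r) (1 - 1) 0 = h := by
        norm_num
      rw [ha, hb]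
    -- the shifted conditions read gaps of the tail
    have hfm : ((PySem.List.pyRange 1 (PySem.List.len (x :: r))).map (· + 1)).filter
          (fun i => decide (atol < PySem.List.pyGetD (h :: x :: r) i 0 - PySem.List.pyGetD (h :: x :: r) (i - 1) 0))
        = ((PySem.List.pyRange 1 (PySem.List.len (x :: r))).filter
          (fun i => decide (atol < PySem.List.pyGetD (x :: r) i 0 - PySem.List.pyGetD (x :: r) (i - 1) 0))).map (· + 1) := by
      rw [List.filter_map]
      congr 1
      apply List.filter_congr
      intro i hi
      have h1i : 1 ≤ i := (PySem.List.mem_pyRange_one.mp hi).1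
      simp only [Function.comp]
      have e1 : i + 1 - 1 = i := by ring
      rw [e1, pvGetD_cons h (x :: r) i 0 (by omega), pvGetD_cons' h (x :: r) i 0 h1i]
    rw [hrange, List.filter_cons, hfm]
    simp only [hP1]
    -- assemble the bounds as a mapped tail-bounds list
    have hL : ∃ c l', (((PySem.List.pyRange 1 (PySem.List.len (x :: r))).filter
          (fun i => decide (atol < PySem.List.pyGetD (x :: r) i 0 - PySem.List.pyGetD (x :: r) (i - 1) 0)))
        ++ [PySem.List.len (x :: r)]) = c :: l' := by
      cases hc : (((PySem.List.pyRange 1 (PySem.List.len (x :: r))).filter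
          (fun i => decide (atol < PySem.List.pyGetD (x :: r) i 0 - PySem.List.pyGetD (x :: r) (i - 1) 0)))
        ++ [PySem.List.len (x :: r)]) with
      | nil => exact absurd hc (by simp)
      | cons c l' => exact ⟨c, l', rfl⟩
    obtain ⟨c, l', hLc⟩ := hL
    have hnn : ∀ y ∈ (0 : Int) :: c :: l', 0 ≤ y := by
      intro y hy
      rcases List.mem_cons.mp hy with hy | hy
      · omega
      rw [← hLc] at hy
      rcases List.mem_append.mp hy with hy | hy
      · have := (PySem.List.mem_pyRange_one.mp (List.mem_of_mem_filter hy)).1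
        omega
      · simp [PySem.List.len] at hy
        omega
    have hc0 : 0 ≤ c := hnn c (by simp)
    have hIH := ih x
    rw [hLc] at hIH
    have hs01 : PySem.List.slice (h :: x :: r) (some 0) (some 1) = [h] := by
      rw [PySem.List.slice_toNat _ (le_refl 0) (by norm_num)]
      rfl
    by_cases hgap : atol < x - h
    · rw [if_pos (by simpa using hgap), List.cons_append]
      have hb1 : (1 : Int) :: (((PySem.List.pyRange 1 (PySem.List.len (x :: r))).filter
            (fun i => decide (atol < PySem.List.pyGetD (x :: r) i 0 - PySem.List.pyGetD (x :: r) (i - 1) 0))).map (· + 1)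
          ++ [PySem.List.len (h :: x :: r)]) = ((0 : Int) :: c :: l').map (· + 1) := by
        rw [hlen2, ← hLc]
        simp
      rw [show ((0:Int) :: 1 :: (((PySem.List.pyRange 1 (PySem.List.len (x :: r))).filter
            (fun i => decide (atol < PySem.List.pyGetD (x :: r) i 0 - PySem.List.pyGetD (x :: r) (i - 1) 0))).map (· + 1)
          ++ [PySem.List.len (h :: x :: r)])) = 0 :: ((0 : Int) :: c :: l').map (· + 1) from by rw [← hb1]]
      have hsplit : (0 : Int) :: ((0 : Int) :: c :: l').map (· + 1) = 0 :: 1 :: ((c :: l').map (· + 1)) := by simp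
      rw [hsplit, pvSlices_cons_cons, hs01, show (1 : Int) :: ((c :: l').map (· + 1)) = ((0 : Int) :: c :: l').map (· + 1) from by simp,
          pvSlices_shift h (x :: r) _ hnn, hIH]
      simp only [pvGrp]
      rw [if_neg (by omega)]
    · rw [if_neg (by simpa using hgap)]
      have hb2 : (((PySem.List.pyRange 1 (PySem.List.len (x :: r))).filter
            (fun i => decide (atol < PySem.List.pyGetD (x :: r) i 0 - PySem.List.pyGetD (x :: r) (i - 1) 0))).map (· + 1)
          ++ [PySem.List.len (h :: x :: r)]) = ((c : Int) :: l').map (· + 1) := by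
        rw [hlen2, ← hLc]
        simp
      rw [hb2]
      have hsplit : (0 : Int) :: ((c : Int) :: l').map (· + 1) = 0 :: (c + 1) :: (l'.map (· + 1)) := by simp
      rw [hsplit, pvSlices_cons_cons, pvSliceZero h (x :: r) c hc0,
          show (c + 1) :: (l'.map (· + 1)) = ((c : Int) :: l').map (· + 1) from by simp,
          pvSlices_shift h (x :: r) _ (fun y hy => hnn y (List.mem_cons_of_mem _ hy))]
      rw [pvSlices_cons_cons] at hIH
      simp only [pvGrp]
      rw [if_pos (by omega), ← hIH]

-- ===== VERDICT (by name: the statement is the Claim_ definition above) =====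
theorem cluster_abs_1d_spec : Claim_equal_cluster_abs_1d := by
  intro input_values atol _
  show cluster_abs_1d input_values atol = cluster_abs_1d_alt input_values atol
  simp only [cluster_abs_1d, cluster_abs_1d_alt]
  cases he : input_values.isEmpty with
  | true => simp
  | false =>
    simp only [Bool.false_eq_true, if_false]
    have hs : PySem.List.sorted input_values (fun x => x) ≠ [] := by
      intro hnil
      rw [PySem.List.sorted_eq_nil_iff] at hnil
      rw [hnil] at he
      simp at he
    cases hseq : PySem.List.sorted input_values (fun x => x) with
    | nil => exact absurd hseq hs
    | cons h t =>
      congr 1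
      have h0 : PySem.List.pyGetD (h :: t) 0 0 = h := by
        rw [PySem.List.pyGetD_of_nonneg _ _ (le_refl 0)]; rfl
      rw [h0]
      rw [PySem.List.foldl_pyRange_pyGetD (h :: t) 0 (pvStepA atol) [[h]] (by norm_num : (0:Int) ≤ 1)]
      have hA := pvFoldA atol t [] [h] h rfl
      simp only [List.nil_append] at hA
      rw [show (Int.toNat 1) = 1 from rfl, List.drop_one, List.tail_cons, hA, pvSlicesB atol t h]
      rcases hgr : pvGrp atol h t with _ | ⟨c1, cs⟩
      · exact absurd hgr (pvGrp_ne_nil atol h t)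
      · simp
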